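-- pv_equiv track=rewrite | github.com/tenxstudio/devtale | devtale/aggregators/javascript.py | _extract_indentation
-- ===== SOURCE A (Python) =====
-- def _extract_indentation(code_line):
--     indentation = 0
--     for char in code_line:
--         if char == "\t":
--             indentation += 4
--         elif char == " ":
--             indentation += 1
--         else:
--             break
--     return indentation
-- ===== SOURCE B (Python) =====
-- def _extract_indentation(code_line):
--     prefix = code_line[:len(code_line) - len(code_line.lstrip(" \t"))]
--     return prefix.count("\t") * 4 + prefix.count(" ")
-- ===== Notes on version B (the rewrite author's own statement) =====
-- stated objective: simpler
-- what changed: Replaces the accumulating loop with early break by slicing off the leading space/tab prefix (via lstrip) and summing two character counts over it.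
import Mathlib
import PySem

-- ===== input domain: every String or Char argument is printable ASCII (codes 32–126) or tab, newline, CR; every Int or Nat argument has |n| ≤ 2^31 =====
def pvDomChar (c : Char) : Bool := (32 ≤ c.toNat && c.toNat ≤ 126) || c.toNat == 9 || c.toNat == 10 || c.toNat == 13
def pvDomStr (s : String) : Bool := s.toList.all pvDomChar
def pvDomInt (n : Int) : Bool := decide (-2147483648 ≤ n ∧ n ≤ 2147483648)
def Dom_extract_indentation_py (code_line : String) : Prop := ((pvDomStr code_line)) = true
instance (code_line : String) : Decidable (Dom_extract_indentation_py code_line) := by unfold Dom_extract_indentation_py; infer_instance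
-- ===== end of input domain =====

-- B replaces A's accumulating loop (with early break) by slicing off the leading
-- space/tab prefix and summing two character counts over it (objective: simpler).

-- ===== PORT A =====
-- the for-loop with break, as structural recursion over the characters with accumulator
def extractIndentLoop : List Char → Int → Int
  | [], indentation => indentation
  | c :: cs, indentation =>
    if c == '\t' then extractIndentLoop cs (indentation + 4)
    else if c == ' ' then extractIndentLoop cs (indentation + 1)
    else indentation

def extract_indentation_py (code_line : String) : Int :=
  extractIndentLoop code_line.toList 0

-- ===== PORT B =====
-- code_line.lstrip(" \t") ported by hand as dropWhile over the chars (exact: Python's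
-- lstrip with the explicit char set " \t" drops exactly the leading spaces and tabs)
def lstripTabSpace (cs : List Char) : List Char :=
  cs.dropWhile (fun c => c == ' ' || c == '\t')

def extract_indentation_py_alt (code_line : String) : Int :=
  let cs := code_line.toList
  let pre := PySem.List.slice cs none (some ((cs.length : Int) - (lstripTabSpace cs).length))
  (PySem.Chars.count pre ['\t'] : Int) * 4 + (PySem.Chars.count pre [' '] : Int)

-- ===== PRECONDITION & SPEC =====
def Spec_extract_indentation_py (code_line : String) (out : Int) : Prop := out = extract_indentation_py_alt code_line
instance (code_line : String) (out : Int) : Decidable (Spec_extract_indentation_py code_line out) := by unfold Spec_extract_indentation_py; infer_instance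

-- ===== CLAIM (what is proved, stated in full; the proofs are below) =====
def Claim_equal_extract_indentation_py : Prop := ∀ (code_line : String), Dom_extract_indentation_py code_line → Spec_extract_indentation_py code_line (extract_indentation_py code_line)

-- ===== LEMMAS AND PROOFS =====

-- str.count with a single-character needle is List.count
lemma count_go_singleton (c : Char) : ∀ (l : List Char) (fuel acc : ℕ), l.length ≤ fuel →
    PySem.Chars.count.go [c] fuel l acc = acc + l.count c := by
  intro l
  induction l with
  | nil => intro fuel acc h; cases fuel <;> simp [PySem.Chars.count.go]
  | cons hd tl ih =>
    intro fuel acc h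
    cases fuel with
    | zero => simp at h
    | succ n =>
      simp only [PySem.Chars.count.go]
      by_cases hc : hd = c
      · subst hc
        simp [List.isPrefixOf, ih _ _ (by simpa using h)]
        ring
      · simp [List.isPrefixOf, hc, ih _ _ (by simpa using h), Ne.symm hc]

lemma count_singleton (c : Char) (l : List Char) :
    PySem.Chars.count l [c] = l.count c := by
  simpa [PySem.Chars.count] using count_go_singleton c l l.length 0 le_rfl

-- the slice B takes is exactly the space/tab takeWhile prefix
lemma slice_eq_takeWhile (cs : List Char) :
    PySem.List.slice cs none (some ((cs.length : Int) - (lstripTabSpace cs).length)) =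
      cs.takeWhile (fun c => c == ' ' || c == '\t') := by
  have hlen : (lstripTabSpace cs).length ≤ cs.length := by
    simpa [lstripTabSpace] using List.length_dropWhile_le (fun c => c == ' ' || c == '\t') cs
  rw [PySem.List.slice_to cs (by omega)]
  have : ((cs.length : Int) - (lstripTabSpace cs).length).toNat
      = (cs.takeWhile (fun c => c == ' ' || c == '\t')).length := by
    have h2 : (cs.takeWhile (fun c => c == ' ' || c == '\t')).length
        + (lstripTabSpace cs).length = cs.length := by
      have h3 := congrArg List.length
        (List.takeWhile_append_dropWhile (p := fun c => c == ' ' || c == '\t') (l := cs))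
      rw [List.length_append] at h3
      simpa [lstripTabSpace] using h3
    omega
  rw [this]
  exact (List.prefix_iff_eq_take.mp (List.takeWhile_prefix _)).symm

-- A's loop computes acc + (4·#tabs + #spaces) of the takeWhile prefix
lemma loop_eq (l : List Char) : ∀ (acc : Int),
    extractIndentLoop l acc =
      acc + ((l.takeWhile (fun c => c == ' ' || c == '\t')).count '\t' : Int) * 4
          + ((l.takeWhile (fun c => c == ' ' || c == '\t')).count ' ' : Int) := by
  induction l with
  | nil => intro acc; simp [extractIndentLoop]
  | cons hd tl ih =>
    intro acc
    by_cases ht : hd = '\t'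
    · subst ht
      simp [extractIndentLoop, ih]
      ring
    · by_cases hs : hd = ' '
      · subst hs
        simp [extractIndentLoop, ih, ht]
        ring
      · simp [extractIndentLoop, ht, hs]

-- ===== VERDICT (by name: the statement is the Claim_ definition above) =====
theorem extract_indentation_py_spec : Claim_equal_extract_indentation_py := by
  intro code_line _
  unfold Spec_extract_indentation_py extract_indentation_py extract_indentation_py_alt
  simp only [slice_eq_takeWhile, count_singleton, loop_eq]
  ring
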